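-- pv_equiv track=rewrite | github.com/moates695/cs9517_Group_Project | marcus/functions.py | seperate_open
-- ===== SOURCE A (Python) =====
-- NROWS = 700
--
-- NCOLS = 1100
--
-- def erode(pts):
--     eroded1_pts = {}
--     for (x,y) in pts:
--         if (x,y-1) in pts and (x, y+1) in pts:
--             eroded1_pts[(x,y)] = pts[(x,y)]
--     eroded2_pts = {}
--     for (x,y) in eroded1_pts:
--         if (x-1,y) in eroded1_pts and (x+1, y) in eroded1_pts:
--             eroded2_pts[(x,y)] = eroded1_pts[(x,y)]
--     return eroded2_pts
--
-- def check_coords(pt):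
--     if pt[0] < 0 or pt[0] > NROWS-1 or pt[1] < 0 or pt[1] > NCOLS-1:
--         return False
--     return True
--
-- def dilate(pts):
--     dilated1_pts = pts.copy()
--     for (x,y) in pts:
--         if (x,y-1) not in pts and check_coords((x,y-1)):
--             dilated1_pts[(x, y-1)] = pts[(x,y)]
--         if (x, y+1) not in pts and check_coords((x,y+1)):
--             dilated1_pts[(x, y+1)] = pts[(x,y)]
--     dilated2_pts = dilated1_pts.copy()
--     for (x,y) in dilated1_pts:
--         if (x-1,y) not in dilated1_pts and check_coords((x-1,y)):
--             dilated2_pts[(x-1, y)] = dilated1_pts[(x,y)]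
--         if (x+1, y) not in dilated1_pts and check_coords((x+1,y)):
--             dilated2_pts[(x+1, y)] = dilated1_pts[(x,y)]
--     return dilated2_pts
--
-- def get_labels(pts):
--     label = {}
--     for pt, lbl in pts.items():
--         if lbl not in label:
--             label[lbl] = {pt: lbl}
--         else:
--             label[lbl][pt] = lbl
--     return label
--
-- def seperate_open(pts, sweeps=3):
--     labels = get_labels(pts)
--     new_pts = {}
--     for label, cell_pts in labels.items():
--         dilated = cell_pts.copy()
--         for _ in range(sweeps):
--             dilated = dilate(dilated)
--
--         eroded = dilated.copy()
--         for _ in range(sweeps):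
--             eroded = erode(eroded)
--
--         for pt, label in eroded.items():
--             new_pts[pt] = label
--     return new_pts
-- ===== SOURCE B (Python) =====
-- NROWS = 700
--
-- NCOLS = 1100
--
-- def _in_bounds(x, y):
--     return 0 <= x <= NROWS - 1 and 0 <= y <= NCOLS - 1
--
-- def _dilate_pass(cells, dx, dy):
--     # one separable dilation pass over an ordered point list: keep the cells,
--     # then append each missing in-bounds neighbour in discovery order
--     orig = set(cells)
--     added = set()
--     out = list(cells)
--     for (x, y) in cells:
--         for n in ((x - dx, y - dy), (x + dx, y + dy)):
--             if n not in orig and _in_bounds(n[0], n[1]) and n not in added: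
--                 added.add(n)
--                 out.append(n)
--     return out
--
-- def _erode_full(cells):
--     # one-pass 3x3-square erosion: a cell survives iff its whole 3x3
--     # neighbourhood is present (Minkowski composition of the two passes)
--     s = set(cells)
--     return [(x, y) for (x, y) in cells
--             if all((x + i, y + j) in s for i in (-1, 0, 1) for j in (-1, 0, 1))]
--
-- def seperate_open(pts, sweeps=3):
--     labels = []
--     for lbl in pts.values():
--         if lbl not in labels:
--             labels.append(lbl)
--     new_pts = {}
--     for lbl in labels:
--         cells = [p for p, l in pts.items() if l == lbl]
--         for _ in range(sweeps):
--             cells = _dilate_pass(cells, 0, 1)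
--             cells = _dilate_pass(cells, 1, 0)
--         for _ in range(sweeps):
--             cells = _erode_full(cells)
--         for p in cells:
--             new_pts[p] = lbl
--     return new_pts
-- ===== Notes on version B (the rewrite author's own statement) =====
-- stated objective: alternative
-- what changed: B drops A's dict-of-dicts machinery: labels are collected by a flat ordered scan, each label's cell set is kept as an ordered point list with set-membership tests, the separable dilation passes append missing in-bounds neighbours in discovery order, and A's two-pass erosion per sweep is fused into a single filter that keeps a point iff its whole 3x3 neighbourhood is present (Minkowski composition).
import Mathlib
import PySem

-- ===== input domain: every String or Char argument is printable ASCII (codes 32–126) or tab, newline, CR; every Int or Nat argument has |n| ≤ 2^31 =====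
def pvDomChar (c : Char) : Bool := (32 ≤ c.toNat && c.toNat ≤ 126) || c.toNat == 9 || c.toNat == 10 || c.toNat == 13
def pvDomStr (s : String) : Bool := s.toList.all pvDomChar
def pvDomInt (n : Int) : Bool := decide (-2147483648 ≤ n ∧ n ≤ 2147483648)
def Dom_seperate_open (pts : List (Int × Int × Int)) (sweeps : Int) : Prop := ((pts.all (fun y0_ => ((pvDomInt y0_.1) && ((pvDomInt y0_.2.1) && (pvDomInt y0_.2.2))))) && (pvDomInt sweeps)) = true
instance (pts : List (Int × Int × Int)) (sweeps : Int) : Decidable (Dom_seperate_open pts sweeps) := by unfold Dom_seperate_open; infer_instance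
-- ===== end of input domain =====

-- B replaces A's dicts-of-dicts by ordered point lists with set membership, fuses the
-- two-pass erosion into one 3x3-neighbourhood filter, and groups labels by a flat scan
-- (objective: alternative/simpler structure; same exact return value).

-- ===== PORT A =====
-- dict[(x,y)] -> label is modelled as PySem.Dict (Int × Int) Int; the input triple list
-- is loaded with Dict.ofList, exactly Python's construction of the argument dict.
def checkCoordsA (pt : Int × Int) : Bool :=
  if pt.1 < 0 ∨ pt.1 > 700 - 1 ∨ pt.2 < 0 ∨ pt.2 > 1100 - 1 then false else true

def erodeA (pts : PySem.Dict (Int × Int) Int) : PySem.Dict (Int × Int) Int :=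
  let eroded1 := pts.keys.foldl (fun acc p =>
    if pts.contains (p.1, p.2 - 1) && pts.contains (p.1, p.2 + 1) then
      acc.insert p (pts.getD p 0) else acc) PySem.Dict.empty
  eroded1.keys.foldl (fun acc p =>
    if eroded1.contains (p.1 - 1, p.2) && eroded1.contains (p.1 + 1, p.2) then
      acc.insert p (eroded1.getD p 0) else acc) PySem.Dict.empty

def dilateA (pts : PySem.Dict (Int × Int) Int) : PySem.Dict (Int × Int) Int :=
  let dilated1 := pts.keys.foldl (fun acc p =>
    let acc1 := if !pts.contains (p.1, p.2 - 1) && checkCoordsA (p.1, p.2 - 1) then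
      acc.insert (p.1, p.2 - 1) (pts.getD p 0) else acc
    if !pts.contains (p.1, p.2 + 1) && checkCoordsA (p.1, p.2 + 1) then
      acc1.insert (p.1, p.2 + 1) (pts.getD p 0) else acc1) pts
  dilated1.keys.foldl (fun acc p =>
    let acc1 := if !dilated1.contains (p.1 - 1, p.2) && checkCoordsA (p.1 - 1, p.2) then
      acc.insert (p.1 - 1, p.2) (dilated1.getD p 0) else acc
    if !dilated1.contains (p.1 + 1, p.2) && checkCoordsA (p.1 + 1, p.2) then
      acc1.insert (p.1 + 1, p.2) (dilated1.getD p 0) else acc1) dilated1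

def getLabelsA (pts : PySem.Dict (Int × Int) Int) :
    PySem.Dict Int (PySem.Dict (Int × Int) Int) :=
  pts.items.foldl (fun lab q =>
    if !lab.contains q.2 then lab.insert q.2 (PySem.Dict.empty.insert q.1 q.2)
    else lab.insert q.2 ((lab.getD q.2 PySem.Dict.empty).insert q.1 q.2)) PySem.Dict.empty

def seperate_open (pts : List (Int × Int × Int)) (sweeps : Int) : List (Int × Int × Int) :=
  let d0 := PySem.Dict.ofList (pts.map (fun t => ((t.1, t.2.1), t.2.2)))
  let labels := getLabelsA d0
  let newPts := labels.items.foldl (fun np q =>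
    let dilated := (PySem.List.pyRange 0 sweeps 1).foldl (fun d _ => dilateA d) q.2
    let eroded := (PySem.List.pyRange 0 sweeps 1).foldl (fun d _ => erodeA d) dilated
    eroded.items.foldl (fun np r => np.insert r.1 r.2) np) PySem.Dict.empty
  newPts.items.map (fun r => (r.1.1, r.1.2, r.2))

-- ===== PORT B =====
def inBoundsB (x y : Int) : Bool := decide (0 ≤ x ∧ x ≤ 700 - 1 ∧ 0 ≤ y ∧ y ≤ 1100 - 1)

-- the body of Source B's inner `for n in (…, …)` loop, applied to each candidate neighbour
def bStep (orig : PySem.Set (Int × Int)) (st : List (Int × Int) × PySem.Set (Int × Int))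
    (n : Int × Int) : List (Int × Int) × PySem.Set (Int × Int) :=
  if !orig.contains n && inBoundsB n.1 n.2 && !st.2.contains n then
    (st.1 ++ [n], PySem.Set.add st.2 n) else st

def dilatePassB (cells : List (Int × Int)) (dx dy : Int) : List (Int × Int) :=
  let orig : PySem.Set (Int × Int) := PySem.Set.ofList cells
  (cells.foldl (fun st p =>
    bStep orig (bStep orig st (p.1 - dx, p.2 - dy)) (p.1 + dx, p.2 + dy))
    (cells, PySem.Set.empty)).1

def nbr9 : List (Int × Int) :=
  [(-1, -1), (-1, 0), (-1, 1), (0, -1), (0, 0), (0, 1), (1, -1), (1, 0), (1, 1)]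

def erodeFullB (cells : List (Int × Int)) : List (Int × Int) :=
  let s : PySem.Set (Int × Int) := PySem.Set.ofList cells
  cells.filter (fun p => nbr9.all (fun o => s.contains (p.1 + o.1, p.2 + o.2)))

def seperate_open_alt (pts : List (Int × Int × Int)) (sweeps : Int) : List (Int × Int × Int) :=
  let d0 := PySem.Dict.ofList (pts.map (fun t => ((t.1, t.2.1), t.2.2)))
  let labelList : PySem.Set Int := PySem.Set.ofList (d0.values)
  let newPts := labelList.foldl (fun np lbl =>
    let cells0 := (d0.items.filter (fun q => q.2 == lbl)).map (fun q => q.1)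
    let dil := (PySem.List.pyRange 0 sweeps 1).foldl
      (fun cs _ => dilatePassB (dilatePassB cs 0 1) 1 0) cells0
    let er := (PySem.List.pyRange 0 sweeps 1).foldl (fun cs _ => erodeFullB cs) dil
    er.foldl (fun np p => np.insert p lbl) np) PySem.Dict.empty
  newPts.items.map (fun r => (r.1.1, r.1.2, r.2))

-- ===== PRECONDITION & SPEC =====
def Spec_seperate_open (pts : List (Int × Int × Int)) (sweeps : Int) (out : List (Int × Int × Int)) : Prop := out = seperate_open_alt pts sweeps
instance (pts : List (Int × Int × Int)) (sweeps : Int) (out : List (Int × Int × Int)) : Decidable (Spec_seperate_open pts sweeps out) := by unfold Spec_seperate_open; infer_instance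

-- ===== CLAIM (what is proved, stated in full; the proofs are below) =====
def Claim_equal_seperate_open : Prop := ∀ (pts : List (Int × Int × Int)) (sweeps : Int), Dom_seperate_open pts sweeps → Spec_seperate_open pts sweeps (seperate_open pts sweeps)

-- ===== LEMMAS AND PROOFS =====

-- a dict all of whose values are the label l, given by its ordered key list
def dOf (l : Int) (ks : List (Int × Int)) : PySem.Dict (Int × Int) Int :=
  PySem.Dict.mk (ks.map (fun k => (k, l)))

theorem items_dOf (l : Int) (ks : List (Int × Int)) :
    (dOf l ks).items = ks.map (fun k => (k, l)) := rfl

theorem keys_dOf (l : Int) (ks : List (Int × Int)) : (dOf l ks).keys = ks := by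
  simp only [PySem.Dict.keys, items_dOf, List.map_map]
  exact (List.map_congr_left (fun a _ => rfl)).trans (List.map_id ks)

theorem get?_dOf (l : Int) (ks : List (Int × Int)) (k : Int × Int) :
    (dOf l ks).get? k = if k ∈ ks then some l else none := by
  induction ks with
  | nil => simp only [dOf, List.map_nil, List.not_mem_nil, if_false]; rfl
  | cons a t ih =>
    simp only [dOf, List.map_cons, PySem.Dict.get?_mk_cons]
    by_cases h : a = k
    · simp [h]
    · simpa [h, beq_iff_eq, Ne.symm h] using ih

theorem contains_dOf (l : Int) (ks : List (Int × Int)) (k : Int × Int) :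
    (dOf l ks).contains k = decide (k ∈ ks) := by
  rw [PySem.Dict.contains_eq_decide_mem_keys, keys_dOf]

theorem getD_dOf (l : Int) (ks : List (Int × Int)) (k : Int × Int) (h : k ∈ ks) :
    (dOf l ks).getD k 0 = l := by
  rw [PySem.Dict.getD_eq_get?_getD, get?_dOf]
  simp [h]

theorem insert_dOf_mem (l : Int) (ks : List (Int × Int)) (k : Int × Int) (h : k ∈ ks) :
    (dOf l ks).insert k l = dOf l ks := by
  apply PySem.Dict.ext
  rw [PySem.Dict.items_insert_of_contains _ _ (by simp [contains_dOf, h])]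
  simp only [items_dOf, List.map_map]
  apply List.map_congr_left
  intro a _
  by_cases hak : a = k <;> simp [hak]

theorem insert_dOf_not_mem (l : Int) (ks : List (Int × Int)) (k : Int × Int) (h : k ∉ ks) :
    (dOf l ks).insert k l = dOf l (ks ++ [k]) := by
  apply PySem.Dict.ext
  rw [PySem.Dict.items_insert_of_not_contains _ _ (by simp [contains_dOf, h]), items_dOf, items_dOf]
  simp

theorem check_eq (n : Int × Int) : checkCoordsA n = inBoundsB n.1 n.2 := by
  rcases n with ⟨x, y⟩
  simp only [checkCoordsA, inBoundsB]
  rw [Bool.eq_iff_iff]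
  constructor
  · intro h; split at h
    · exact absurd h (by simp)
    · rename_i hg; simp only [decide_eq_true_eq]; omega
  · intro h; simp only [decide_eq_true_eq] at h; split
    · rename_i hg; omega
    · rfl

theorem bStep_no (orig : PySem.Set (Int × Int)) {st : List (Int × Int) × PySem.Set (Int × Int)}
    {n : Int × Int}
    (h : (!orig.contains n && inBoundsB n.1 n.2 && !st.2.contains n) = false) :
    bStep orig st n = st := by
  simp only [bStep]
  rw [h]
  simp

theorem bStep_yes (orig : PySem.Set (Int × Int)) {st : List (Int × Int) × PySem.Set (Int × Int)}
    {n : Int × Int}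
    (h : (!orig.contains n && inBoundsB n.1 n.2 && !st.2.contains n) = true) :
    bStep orig st n = (st.1 ++ [n], PySem.Set.add st.2 n) := by
  simp only [bStep]
  rw [h]
  simp

-- one candidate neighbour: A's conditional dict insert matches B's conditional append
theorem upd1 (l : Int) (cells : List (Int × Int)) (n : Int × Int) (v : Int) (hv : v = l)
    (added : List (Int × Int)) (hadd : added.Nodup) (hdisj : ∀ a ∈ added, a ∉ cells) :
    ∃ added', bStep (PySem.Set.ofList cells) (cells ++ added, added) n = (cells ++ added', added')
      ∧ added'.Nodup ∧ (∀ a ∈ added', a ∉ cells)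
      ∧ (if !(dOf l cells).contains n && checkCoordsA n then
          (dOf l (cells ++ added)).insert n v else dOf l (cells ++ added)) = dOf l (cells ++ added') := by
  subst hv
  by_cases hmem : n ∈ cells
  · have h1 : (PySem.Set.ofList cells).contains n = true :=
      (PySem.Set.contains_iff _ _).mpr ((PySem.Set.mem_ofList _ _).mpr hmem)
    refine ⟨added, bStep_no _ (by simp only [h1, Bool.not_true, Bool.false_and]), hadd, hdisj,
      by simp [contains_dOf, hmem]⟩
  · have h1 : (PySem.Set.ofList cells).contains n = false := by
      rw [Bool.eq_false_iff]
      intro hc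
      exact hmem ((PySem.Set.mem_ofList _ _).mp ((PySem.Set.contains_iff _ _).mp hc))
    by_cases hb : inBoundsB n.1 n.2 = true
    · by_cases haddm : n ∈ added
      · have h2 : PySem.Set.contains added n = true := (PySem.Set.contains_iff _ _).mpr haddm
        have h3 : n ∈ cells ++ added := by simp [haddm]
        refine ⟨added, bStep_no _ (by simp only [h1, hb, h2, Bool.not_true, Bool.and_false]),
          hadd, hdisj, ?_⟩
        simp [contains_dOf, hmem, check_eq, hb, insert_dOf_mem _ _ n h3]
      · have h2 : PySem.Set.contains added n = false := by
          rw [Bool.eq_false_iff]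
          intro hc
          exact haddm ((PySem.Set.contains_iff _ _).mp hc)
        have h3 : n ∉ cells ++ added := by simp [hmem, haddm]
        refine ⟨added ++ [n], ?_, ?_, ?_, ?_⟩
        · rw [bStep_yes _ (by simp only [h1, hb, h2, Bool.not_false, Bool.and_self])]
          rw [PySem.Set.add_of_not_mem haddm, List.append_assoc]
        · refine List.Nodup.append hadd (List.nodup_singleton n) ?_
          intro a ha hb2
          simp only [List.mem_singleton] at hb2
          exact haddm (hb2 ▸ ha)
        · intro a ha
          rcases List.mem_append.mp ha with h | h
          · exact hdisj a h
          · simp only [List.mem_singleton] at h; subst h; exact hmem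
        · simp only [contains_dOf, hmem, decide_false, Bool.not_false, Bool.true_and, check_eq,
            hb, if_true]
          rw [insert_dOf_not_mem _ _ n h3, List.append_assoc]
    · have hb' : inBoundsB n.1 n.2 = false := Bool.eq_false_iff.mpr hb
      refine ⟨added, bStep_no _ (by simp only [hb', Bool.false_and, Bool.and_false, Bool.and_false]),
        hadd, hdisj, ?_⟩
      simp [check_eq, hb']

theorem pass_eq (l : Int) (n1 n2 : (Int × Int) → Int × Int) (cells : List (Int × Int)) :
    ∀ (todo added : List (Int × Int)), (∀ p ∈ todo, p ∈ cells) → added.Nodup →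
      (∀ a ∈ added, a ∉ cells) →
    ∃ added',
      todo.foldl (fun st p => bStep (PySem.Set.ofList cells)
          (bStep (PySem.Set.ofList cells) st (n1 p)) (n2 p)) (cells ++ added, added)
        = (cells ++ added', added')
      ∧ added'.Nodup ∧ (∀ a ∈ added', a ∉ cells)
      ∧ todo.foldl (fun acc p =>
          let acc1 := if !(dOf l cells).contains (n1 p) && checkCoordsA (n1 p) then
            acc.insert (n1 p) ((dOf l cells).getD p 0) else acc
          if !(dOf l cells).contains (n2 p) && checkCoordsA (n2 p) then
            acc1.insert (n2 p) ((dOf l cells).getD p 0) else acc1) (dOf l (cells ++ added))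
        = dOf l (cells ++ added') := by
  intro todo
  induction todo with
  | nil => intro added _ h2 h3; exact ⟨added, rfl, h2, h3, rfl⟩
  | cons p t ih =>
    intro added hsub hadd hdisj
    have hp : p ∈ cells := hsub p (List.mem_cons_self)
    have hv : (dOf l cells).getD p 0 = l := getD_dOf l cells p hp
    obtain ⟨a1, hb1, hn1, hd1, ha1⟩ := upd1 l cells (n1 p) _ hv added hadd hdisj
    obtain ⟨a2, hb2, hn2, hd2, ha2⟩ := upd1 l cells (n2 p) _ hv a1 hn1 hd1
    obtain ⟨a3, hb3, hn3, hd3, ha3⟩ := ih a2 (fun q hq => hsub q (List.mem_cons_of_mem p hq)) hn2 hd2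
    refine ⟨a3, ?_, hn3, hd3, ?_⟩
    · rw [List.foldl_cons, hb1, hb2]
      exact hb3
    · simp only [List.foldl_cons]
      rw [ha1, ha2]
      exact ha3

theorem dilate_eq (l : Int) (ks : List (Int × Int)) (hnd : ks.Nodup) :
    dilateA (dOf l ks) = dOf l (dilatePassB (dilatePassB ks 0 1) 1 0)
      ∧ (dilatePassB (dilatePassB ks 0 1) 1 0).Nodup := by
  obtain ⟨a1, hb1, hn1, hd1, ha1⟩ := pass_eq l (fun p => (p.1, p.2 - 1)) (fun p => (p.1, p.2 + 1))
    ks ks [] (fun p hp => hp) List.nodup_nil (by simp)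
  rw [List.append_nil] at hb1 ha1
  have hnd1 : (ks ++ a1).Nodup :=
    List.Nodup.append hnd hn1 (fun a haks ham => hd1 a ham haks)
  obtain ⟨a2, hb2, hn2, hd2, ha2⟩ := pass_eq l (fun p => (p.1 - 1, p.2)) (fun p => (p.1 + 1, p.2))
    (ks ++ a1) (ks ++ a1) [] (fun p hp => hp) List.nodup_nil (by simp)
  rw [List.append_nil] at hb2 ha2
  have hp1 : dilatePassB ks 0 1 = ks ++ a1 := by
    simp only [dilatePassB]
    rw [PySem.List.foldl_congr_mem _ _ (fun st p => bStep (PySem.Set.ofList ks)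
        (bStep (PySem.Set.ofList ks) st (p.1, p.2 - 1)) (p.1, p.2 + 1)) _
      (by intro st x _; norm_num)]
    rw [show (PySem.Set.empty : PySem.Set (Int × Int)) = ([] : List (Int × Int)) from rfl, hb1]
  have hp2 : dilatePassB (ks ++ a1) 1 0 = (ks ++ a1) ++ a2 := by
    simp only [dilatePassB]
    rw [PySem.List.foldl_congr_mem _ _ (fun st p => bStep (PySem.Set.ofList (ks ++ a1))
        (bStep (PySem.Set.ofList (ks ++ a1)) st (p.1 - 1, p.2)) (p.1 + 1, p.2)) _
      (by intro st x _; norm_num)]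
    rw [show (PySem.Set.empty : PySem.Set (Int × Int)) = ([] : List (Int × Int)) from rfl, hb2]
  constructor
  · rw [hp1, hp2]
    simp only [dilateA]
    simp only [] at ha1 ha2
    rw [keys_dOf l ks, ha1, keys_dOf]
    exact ha2
  · rw [hp1, hp2]
    exact List.Nodup.append hnd1 hn2 (fun a haks ham => hd2 a ham haks)

theorem foldl_if_insert (l : Int) (c : (Int × Int) → Bool) :
    ∀ (todo pre : List (Int × Int)), todo.Nodup → (∀ p ∈ todo, p ∉ pre) →
    todo.foldl (fun acc p => if c p then acc.insert p l else acc) (dOf l pre)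
      = dOf l (pre ++ todo.filter c) := by
  intro todo
  induction todo with
  | nil => intro pre _ _; simp
  | cons p t ih =>
    intro pre hnd hfresh
    have hp : p ∉ pre := hfresh p List.mem_cons_self
    rw [List.foldl_cons]
    by_cases hc : c p = true
    · rw [if_pos hc, insert_dOf_not_mem l pre p hp,
        ih (pre ++ [p]) hnd.of_cons (by
          intro q hq hmem
          rcases List.mem_append.mp hmem with h | h
          · exact hfresh q (List.mem_cons_of_mem p hq) h
          · simp only [List.mem_singleton] at h
            exact (List.nodup_cons.mp hnd).1 (h ▸ hq)),
        List.filter_cons_of_pos hc, List.append_assoc]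
      rfl
    · rw [if_neg hc, ih pre hnd.of_cons (fun q hq => hfresh q (List.mem_cons_of_mem p hq)),
        List.filter_cons_of_neg (by simpa using hc)]

theorem erode_eq (l : Int) (ks : List (Int × Int)) (hnd : ks.Nodup) :
    erodeA (dOf l ks) = dOf l (erodeFullB ks) := by
  have e1 : ks.foldl (fun acc p =>
      if (dOf l ks).contains (p.1, p.2 - 1) && (dOf l ks).contains (p.1, p.2 + 1) then
        acc.insert p ((dOf l ks).getD p 0) else acc) (dOf l [])
      = dOf l (ks.filter (fun p =>
          (dOf l ks).contains (p.1, p.2 - 1) && (dOf l ks).contains (p.1, p.2 + 1))) := by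
    rw [PySem.List.foldl_congr_mem _ _ (fun acc p =>
        if (dOf l ks).contains (p.1, p.2 - 1) && (dOf l ks).contains (p.1, p.2 + 1) then
          acc.insert p l else acc) _
      (by intro acc p hp; rw [getD_dOf l ks p hp])]
    rw [foldl_if_insert l _ ks [] hnd (by simp), List.nil_append]
  have e2 : (ks.filter (fun p =>
        (dOf l ks).contains (p.1, p.2 - 1) && (dOf l ks).contains (p.1, p.2 + 1))).foldl
      (fun acc p =>
        if (dOf l (ks.filter (fun p => (dOf l ks).contains (p.1, p.2 - 1) &&
              (dOf l ks).contains (p.1, p.2 + 1)))).contains (p.1 - 1, p.2) &&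
            (dOf l (ks.filter (fun p => (dOf l ks).contains (p.1, p.2 - 1) &&
              (dOf l ks).contains (p.1, p.2 + 1)))).contains (p.1 + 1, p.2) then
          acc.insert p ((dOf l (ks.filter (fun p => (dOf l ks).contains (p.1, p.2 - 1) &&
              (dOf l ks).contains (p.1, p.2 + 1)))).getD p 0) else acc) (dOf l [])
      = dOf l ((ks.filter (fun p =>
            (dOf l ks).contains (p.1, p.2 - 1) && (dOf l ks).contains (p.1, p.2 + 1))).filter
          (fun p =>
            (dOf l (ks.filter (fun p => (dOf l ks).contains (p.1, p.2 - 1) &&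
              (dOf l ks).contains (p.1, p.2 + 1)))).contains (p.1 - 1, p.2) &&
            (dOf l (ks.filter (fun p => (dOf l ks).contains (p.1, p.2 - 1) &&
              (dOf l ks).contains (p.1, p.2 + 1)))).contains (p.1 + 1, p.2))) := by
    rw [PySem.List.foldl_congr_mem _ _ (fun acc p =>
        if (dOf l (ks.filter (fun p => (dOf l ks).contains (p.1, p.2 - 1) &&
              (dOf l ks).contains (p.1, p.2 + 1)))).contains (p.1 - 1, p.2) &&
            (dOf l (ks.filter (fun p => (dOf l ks).contains (p.1, p.2 - 1) &&
              (dOf l ks).contains (p.1, p.2 + 1)))).contains (p.1 + 1, p.2) then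
          acc.insert p l else acc) _
      (by intro acc p hp; rw [getD_dOf l _ p hp])]
    rw [foldl_if_insert l _ _ [] (hnd.filter _) (by simp), List.nil_append]
  simp only [erodeA]
  rw [show (PySem.Dict.empty : PySem.Dict (Int × Int) Int) = dOf l [] from rfl, keys_dOf, e1,
    keys_dOf, e2]
  congr 1
  rw [List.filter_filter]
  simp only [erodeFullB]
  apply List.filter_congr
  intro p hpks
  rw [Bool.eq_iff_iff]
  simp only [nbr9, List.all_cons, List.all_nil, Bool.and_eq_true, Bool.and_true,
    contains_dOf, decide_eq_true_eq, List.mem_filter, PySem.Set.contains_iff,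
    PySem.Set.mem_ofList, ← sub_eq_add_neg, add_zero]
  tauto

-- labelled grouping: the nested-dict build of get_labels, described in closed form
def labOf (ps : List ((Int × Int) × Int)) : PySem.Dict Int (PySem.Dict (Int × Int) Int) :=
  PySem.Dict.mk ((PySem.Set.ofList (ps.map (fun q => q.2))).map
    (fun l => (l, PySem.Dict.mk (ps.filter (fun q => q.2 == l)))))

theorem ofList_append_singleton {xs : List Int} {x : Int} :
    PySem.Set.ofList (xs ++ [x]) = PySem.Set.add (PySem.Set.ofList xs) x := by
  rw [PySem.Set.ofList_eq_foldl, PySem.Set.ofList_eq_foldl, List.foldl_append]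
  rfl

theorem items_labOf (ps : List ((Int × Int) × Int)) :
    (labOf ps).items = (PySem.Set.ofList (ps.map (fun q => q.2))).map
      (fun l => (l, PySem.Dict.mk (ps.filter (fun q => q.2 == l)))) := rfl

theorem keys_labOf (ps : List ((Int × Int) × Int)) :
    (labOf ps).keys = PySem.Set.ofList (ps.map (fun q => q.2)) := by
  simp only [PySem.Dict.keys, items_labOf, List.map_map]
  exact (List.map_congr_left (fun a _ => rfl)).trans (List.map_id _)

theorem contains_labOf (ps : List ((Int × Int) × Int)) (v : Int) :
    (labOf ps).contains v = decide (v ∈ ps.map (fun q => q.2)) := by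
  rw [PySem.Dict.contains_eq_decide_mem_keys, keys_labOf]
  exact decide_eq_decide.mpr (PySem.Set.mem_ofList _ _)

theorem nodup_keys_labOf (ps : List ((Int × Int) × Int)) : (labOf ps).keys.Nodup := by
  rw [keys_labOf]; exact PySem.Set.nodup_ofList _

theorem getD_labOf (ps : List ((Int × Int) × Int)) (v : Int)
    (h : v ∈ ps.map (fun q => q.2)) :
    (labOf ps).getD v PySem.Dict.empty = PySem.Dict.mk (ps.filter (fun r => r.2 == v)) := by
  have hmem : (v, PySem.Dict.mk (ps.filter (fun r => r.2 == v))) ∈ (labOf ps).items := by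
    rw [items_labOf]
    exact List.mem_map.mpr ⟨v, (PySem.Set.mem_ofList _ _).mpr h, rfl⟩
  exact PySem.Dict.getD_of_mem_items _ hmem (nodup_keys_labOf ps) _

-- labelled grouping: one step of get_labels extends the closed form by one point
theorem getLabels_step (q : (Int × Int) × Int) (done : List ((Int × Int) × Int))
    (hq1 : q.1 ∉ done.map (fun r => r.1)) :
    (if !(labOf done).contains q.2 then
        (labOf done).insert q.2 (PySem.Dict.empty.insert q.1 q.2)
      else (labOf done).insert q.2 (((labOf done).getD q.2 PySem.Dict.empty).insert q.1 q.2))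
      = labOf (done ++ [q]) := by
  by_cases hc : q.2 ∈ done.map (fun r => r.2)
  · have hcond : (!(labOf done).contains q.2) = false := by
      rw [contains_labOf]; simp [hc]
    rw [hcond, if_neg (by simp)]
    rw [getD_labOf done q.2 hc]
    have hinner : (PySem.Dict.mk (done.filter (fun r => r.2 == q.2))).insert q.1 q.2
        = PySem.Dict.mk ((done ++ [q]).filter (fun r => r.2 == q.2)) := by
      apply PySem.Dict.ext
      rw [PySem.Dict.items_insert_of_not_contains _ _ (by
        rw [PySem.Dict.contains_eq_decide_mem_keys]
        simp only [PySem.Dict.keys_mk, decide_eq_false_iff_not]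
        intro hmem
        rcases List.mem_map.mp hmem with ⟨r, hr, hr1⟩
        exact hq1 (List.mem_map.mpr ⟨r, (List.mem_filter.mp hr).1, hr1⟩))]
      show done.filter (fun r => r.2 == q.2) ++ [(q.1, q.2)]
        = (done ++ [q]).filter (fun r => r.2 == q.2)
      rw [List.filter_append]
      simp
    rw [hinner]
    apply PySem.Dict.ext
    rw [PySem.Dict.items_insert_of_contains _ _ (by rw [contains_labOf]; simpa using hc)]
    rw [items_labOf, items_labOf, List.map_map]
    simp only [List.map_append, List.map_cons, List.map_nil]
    rw [ofList_append_singleton,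
      PySem.Set.add_of_mem (by rw [PySem.Set.mem_ofList]; simpa using hc)]
    apply List.map_congr_left
    intro lb hlb
    simp only [Function.comp_apply]
    by_cases hlbq : lb = q.2
    · subst hlbq
      simp only [beq_self_eq_true, if_pos]
    · have h1 : (lb == q.2) = false := by simp [hlbq]
      have h2 : (q.2 == lb) = false := by simp [Ne.symm hlbq]
      simp only [h1, Bool.false_eq_true, if_false, List.filter_append, List.filter_cons,
        h2, List.filter_nil, List.append_nil]
  · have hcond : (!(labOf done).contains q.2) = true := by
      rw [contains_labOf]; simp [hc]
    rw [hcond, if_pos rfl]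
    apply PySem.Dict.ext
    rw [PySem.Dict.items_insert_of_not_contains _ _ (by rw [contains_labOf]; simpa using hc)]
    rw [items_labOf, items_labOf]
    simp only [List.map_append, List.map_cons, List.map_nil]
    rw [ofList_append_singleton,
      PySem.Set.add_of_not_mem (by rw [PySem.Set.mem_ofList]; simpa using hc),
      List.map_append]
    congr 1
    · apply List.map_congr_left
      intro lb hlb
      have hlb' : lb ∈ done.map (fun r => r.2) := (PySem.Set.mem_ofList _ _).mp hlb
      have h2 : (q.2 == lb) = false := by
        simp only [beq_eq_false_iff_ne, ne_eq]
        intro h; exact hc (h ▸ hlb')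
      simp only [List.filter_append, List.filter_cons, h2, Bool.false_eq_true, if_false,
        List.filter_nil, List.append_nil]
    · simp only [List.map_cons, List.map_nil, List.cons.injEq, and_true]
      have h1 : done.filter (fun r => r.2 == q.2) = [] := by
        rw [List.filter_eq_nil_iff]
        intro r hr hbe
        exact hc (List.mem_map.mpr ⟨r, hr, by simpa using hbe⟩)
      have hins : PySem.Dict.empty.insert q.1 q.2 = PySem.Dict.mk [(q.1, q.2)] := by
        apply PySem.Dict.ext
        rw [PySem.Dict.items_insert_of_not_contains _ _ (PySem.Dict.contains_empty _)]
        rfl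
      rw [hins, List.filter_append, h1]
      simp

theorem getLabels_aux :
    ∀ (todo done : List ((Int × Int) × Int)), ((done ++ todo).map (fun q => q.1)).Nodup →
    todo.foldl (fun lab q =>
      if !lab.contains q.2 then lab.insert q.2 (PySem.Dict.empty.insert q.1 q.2)
      else lab.insert q.2 ((lab.getD q.2 PySem.Dict.empty).insert q.1 q.2)) (labOf done)
      = labOf (done ++ todo) := by
  intro todo
  induction todo with
  | nil => intro done _; rw [List.foldl_nil, List.append_nil]
  | cons q t ih =>
    intro done hnd
    have hq1 : q.1 ∉ done.map (fun r => r.1) := by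
      intro hmem
      rw [List.map_append] at hnd
      exact (List.nodup_append.mp hnd).2.2 q.1 hmem q.1 (by simp) rfl
    rw [List.foldl_cons, getLabels_step q done hq1,
      ih (done ++ [q]) (by rw [← List.append_cons]; exact hnd)]
    congr 1
    simp

theorem iter_rel (l : Int) (F : PySem.Dict (Int × Int) Int → PySem.Dict (Int × Int) Int)
    (G : List (Int × Int) → List (Int × Int))
    (hFG : ∀ ks, ks.Nodup → F (dOf l ks) = dOf l (G ks) ∧ (G ks).Nodup) :
    ∀ (steps : List Int) (ks : List (Int × Int)), ks.Nodup →
      steps.foldl (fun d _ => F d) (dOf l ks) = dOf l (steps.foldl (fun c _ => G c) ks)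
        ∧ (steps.foldl (fun c _ => G c) ks).Nodup := by
  intro steps
  induction steps with
  | nil => intro ks h; exact ⟨rfl, h⟩
  | cons s t ih =>
    intro ks h
    have h1 := hFG ks h
    simpa [List.foldl_cons, h1.1] using ih (G ks) h1.2

-- ===== VERDICT (by name: the statement is the Claim_ definition above) =====
theorem seperate_open_spec : Claim_equal_seperate_open := by
  unfold Claim_equal_seperate_open
  intro pts sweeps _
  unfold Spec_seperate_open
  simp only [seperate_open, seperate_open_alt, getLabelsA]
  have hnd : ((PySem.Dict.ofList (pts.map (fun t => ((t.1, t.2.1), t.2.2)))).items.map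
      (fun q => q.1)).Nodup := by
    have h := PySem.Dict.nodup_keys_ofList (pts.map (fun t => ((t.1, t.2.1), t.2.2)))
    simpa [PySem.Dict.keys] using h
  set ps := (PySem.Dict.ofList (pts.map (fun t => ((t.1, t.2.1), t.2.2)))).items with hps
  rw [show (PySem.Dict.empty : PySem.Dict Int (PySem.Dict (Int × Int) Int)) = labOf [] from rfl]
  rw [getLabels_aux ps [] (by simpa using hnd)]
  rw [show ([] : List ((Int × Int) × Int)) ++ ps = ps from List.nil_append ps]
  rw [items_labOf]
  rw [List.foldl_map]
  simp only [PySem.Dict.values]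
  refine congrArg (fun d : PySem.Dict (Int × Int) Int =>
    d.items.map (fun r => (r.1.1, r.1.2, r.2))) ?_
  apply PySem.List.foldl_congr_mem
  intro np lb hlb
  have hc0 : PySem.Dict.mk (ps.filter (fun q => q.2 == lb))
      = dOf lb ((ps.filter (fun q => q.2 == lb)).map (fun q => q.1)) := by
    apply PySem.Dict.ext
    show ps.filter (fun q => q.2 == lb) = _
    rw [items_dOf, List.map_map]
    symm
    refine (List.map_congr_left ?_).trans (List.map_id _)
    intro r hr
    have h2 : r.2 = lb := by simpa using (List.mem_filter.mp hr).2
    cases r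
    simp_all
  have hnd0 : ((ps.filter (fun q => q.2 == lb)).map (fun q => q.1)).Nodup :=
    hnd.sublist ((ps.filter_sublist).map _)
  have hdil := iter_rel lb dilateA (fun c => dilatePassB (dilatePassB c 0 1) 1 0)
    (fun ks h => dilate_eq lb ks h) (PySem.List.pyRange 0 sweeps 1) _ hnd0
  have her := iter_rel lb erodeA erodeFullB
    (fun ks h => ⟨erode_eq lb ks h, by simp only [erodeFullB]; exact h.filter _⟩)
    (PySem.List.pyRange 0 sweeps 1) _ hdil.2
  rw [hc0, hdil.1, her.1, items_dOf, List.foldl_map]
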